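-- pv_equiv track=rewrite | github.com/drtconway/pykmer | pykmer/basics.py | kmersList
-- ===== SOURCE A (Python) =====
-- _nuc = { 'A':0, 'a':0, 'C':1, 'c':1, 'G':2, 'g':2, 'T':3, 't':3, 'U':3, 'u':3 }
--
-- def kmersList(k, seq, bothStrands=False):
--     """
--     Extract *k*-mers from a string nucleotide sequence `seq` and
--     return them as a list.  The parameter `bothStrands` determines
--     whether the sequence of result *k*-mers should include the
--     reverse complement of each *k*-mer extracted from the string.
--
--     The *k*-mers are extracted using a *sliding* window, not a
--     *tiling* window.  This means that the results include the *k*-mer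
--     starting at each position in the string:
--         0, 1, 2, ...., len(str) - k + 1.
--
--     Any *k*-mers overlaying characters *other* than AaCcGgTtUu are
--     skipped.
--
--     Values of `k` > 30 are not guaranteed to work.
--     """
--     z = len(seq)
--     msk = (1 << (2*k)) - 1
--     s = 2*(k-1)
--     i = 0
--     j = 0
--     x = 0
--     xb = 0
--     res = []
--     while i + k <= z:
--         while i + j < z and j < k:
--             b = _nuc.get(seq[i+j], 4)
--             if b == 4:
--                 i += j + 1
--                 j = 0
--                 x = 0
--                 xb = 0
--             else:
--                 x = (x << 2) | b
--                 xb = (xb >> 2) | ((3 - b) << s)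
--                 j += 1
--         if j == k:
--             x &= msk
--             res.append(x)
--             if bothStrands:
--                 res.append(xb)
--             j -= 1
--         i += 1
--     return res
-- ===== SOURCE B (Python) =====
-- _nuc = { 'A':0, 'a':0, 'C':1, 'c':1, 'G':2, 'g':2, 'T':3, 't':3, 'U':3, 'u':3 }
--
-- def kmersList(k, seq, bothStrands=False):
--     res = []
--     for i in range(len(seq) - k + 1):
--         x = 0
--         xb = 0
--         t = 0
--         good = True
--         for c in seq[i:i+k]:
--             b = _nuc.get(c, 4)
--             if b == 4:
--                 good = False
--                 break
--             x = x * 4 + b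
--             xb = xb + (3 - b) * 4 ** t
--             t += 1
--         if good:
--             res.append(x)
--             if bothStrands:
--                 res.append(xb)
--     return res
-- ===== Notes on version B (the rewrite author's own statement) =====
-- stated objective: simpler
-- what changed: Replaces A's rolling-hash state machine (incremental shift/mask updates with reset-on-invalid and carry-over of state between overlapping windows) by independent per-window recomputation: for each start position, re-encode the k-character slice from scratch with plain arithmetic and skip the window on the first invalid character.
-- outside the precondition, e.g. on kmersList(0, '!', False): A returns [0, 0], B returns [0, 0]; on kmersList(0, '', False): A returns [0], B returns [0]
import Mathlib
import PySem

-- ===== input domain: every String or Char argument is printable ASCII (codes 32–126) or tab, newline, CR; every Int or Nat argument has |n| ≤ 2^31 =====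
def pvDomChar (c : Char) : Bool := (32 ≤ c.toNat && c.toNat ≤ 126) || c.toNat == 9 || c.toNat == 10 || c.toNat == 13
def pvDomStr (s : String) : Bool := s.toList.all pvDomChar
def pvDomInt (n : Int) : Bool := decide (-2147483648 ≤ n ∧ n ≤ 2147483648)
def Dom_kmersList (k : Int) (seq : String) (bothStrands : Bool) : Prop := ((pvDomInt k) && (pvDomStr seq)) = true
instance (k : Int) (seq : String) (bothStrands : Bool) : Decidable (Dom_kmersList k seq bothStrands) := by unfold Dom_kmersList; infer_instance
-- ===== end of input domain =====

-- B replaces A's rolling-hash state machine by independent per-window re-encoding (simpler, not faster);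
-- return values agree on Pre_ (1 ≤ k): for k ≤ 0 the Python A raises ValueError on most inputs.

-- ===== PORT A =====
-- the module constant _nuc (shared context of Source A and Source B)
def nuc : PySem.Dict Char Int :=
  PySem.Dict.ofList [('A',0),('a',0),('C',1),('c',1),('G',2),('g',2),('T',3),('t',3),('U',3),('u',3)]

-- _nuc.get(seq[p], 4); the `none` arm is unreachable (the loop guard keeps 0 ≤ p < len(seq))
def bOf (cs : List Char) (p : Int) : Int :=
  match PySem.List.pyGet? cs p with
  | some c => PySem.Dict.getD nuc c 4
  | none => 4

-- A's inner `while` loop; Python's `<<`/`>>`/`|` are `<<<`/`>>>`/`PySem.Int.bor`.  The shift amount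
-- s is Python's 2*(k-1) as a Nat: nonnegative whenever the shift is evaluated under Pre_ (1 ≤ k).
def innerA (cs : List Char) (z k : Int) (s : Nat) (i j x xb : Int) : Int × Int × Int × Int :=
  if h : i + j < z ∧ j < k then
    let b := bOf cs (i + j)
    if b == 4 then
      innerA cs z k s (i + j + 1) 0 0 0
    else
      innerA cs z k s i (j + 1) (PySem.Int.bor (x <<< (2:Nat)) b)
        (PySem.Int.bor (xb >>> (2:Nat)) ((3 - b) <<< s))
  else (i, j, x, xb)
  termination_by (z - (i + j)).toNat
  decreasing_by all_goals omega

-- A's outer `while` loop.  The fuel argument only makes the recursion total (one unit per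
-- iteration); kmersList passes more than the loop can consume, so it never runs out there.
def outerA (cs : List Char) (z k msk : Int) (s : Nat) (both : Bool) :
    Nat → Int → Int → Int → Int → List Int → List Int
  | 0, _, _, _, _, res => res
  | fuel + 1, i, j, x, xb, res =>
    if i + k ≤ z then
      let t := innerA cs z k s i j x xb
      if t.2.1 == k then
        let x2 := PySem.Int.band t.2.2.1 msk
        outerA cs z k msk s both fuel (t.1 + 1) (t.2.1 - 1) x2 t.2.2.2
          ((res ++ [x2]) ++ (if both then [t.2.2.2] else []))
      else
        outerA cs z k msk s both fuel (t.1 + 1) t.2.1 t.2.2.1 t.2.2.2 res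
    else res

-- msk = (1 << (2*k)) - 1 and s = 2*(k-1); the `.toNat`s are exact on Pre_ (1 ≤ k): for k < 0
-- Python raises building msk, and for k = 0 the shift by s is never reached by A's returning runs.
def kmersList (k : Int) (seq : String) (bothStrands : Bool) : List Int :=
  outerA seq.toList (PySem.Str.len seq) k (((1:Int) <<< (2*k).toNat) - 1) (2*(k-1)).toNat bothStrands
    ((PySem.Str.len seq - k + 1).toNat + 1) 0 0 0 0 []

-- ===== PORT B =====
-- Source B's inner `for c in seq[i:i+k]` loop with its early `break` (good = False ⇒ none)
def encWin (t : Nat) (x xb : Int) : List Char → Option (Int × Int)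
  | [] => some (x, xb)
  | c :: rest =>
    let b := PySem.Dict.getD nuc c 4
    if b == 4 then none
    else encWin (t + 1) (x * 4 + b) (xb + (3 - b) * 4 ^ t) rest

def kmersList_alt (k : Int) (seq : String) (bothStrands : Bool) : List Int :=
  (PySem.List.pyRange 0 (PySem.Str.len seq - k + 1)).foldl
    (fun res i =>
      match encWin 0 0 0 (PySem.List.slice seq.toList (some i) (some (i + k))) with
      | some (x, xb) => (res ++ [x]) ++ (if bothStrands then [xb] else [])
      | none => res) []

-- ===== PRECONDITION & SPEC =====
-- Pre_ requires 1 ≤ k: for k < 0 A always raises ValueError (negative shift building msk), and for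
-- k = 0 A raises ValueError (negative shift s) as soon as it meets a nucleotide character, returning
-- a list of zeros only on degenerate nucleotide-free sequences.
def Pre_kmersList (k : Int) (seq : String) (bothStrands : Bool) : Prop := 1 ≤ k
instance (k : Int) (seq : String) (bothStrands : Bool) : Decidable (Pre_kmersList k seq bothStrands) := by
  unfold Pre_kmersList; infer_instance
def pvWitness_kmersList : Int × String × Bool := (2, "ACGTxACGT", true)

def Spec_kmersList (k : Int) (seq : String) (bothStrands : Bool) (out : List Int) : Prop := out = kmersList_alt k seq bothStrands
instance (k : Int) (seq : String) (bothStrands : Bool) (out : List Int) : Decidable (Spec_kmersList k seq bothStrands out) := by unfold Spec_kmersList; infer_instance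

-- ===== CLAIM (what is proved, stated in full; the proofs are below) =====
def Claim_equal_kmersList : Prop := ∀ (k : Int) (seq : String) (bothStrands : Bool), Dom_kmersList k seq bothStrands → Pre_kmersList k seq bothStrands → Spec_kmersList k seq bothStrands (kmersList k seq bothStrands)

-- ===== LEMMAS AND PROOFS =====

-- ---- arithmetic bridges for A's bit operations on nonnegative values ----

theorem lor_shiftLeft_eq_add (a b n : Nat) (h : b < 2^n) : (a <<< n) ||| b = a * 2^n + b := by
  apply Nat.eq_of_testBit_eq; intro k
  rw [Nat.testBit_or, Nat.testBit_shiftLeft, Nat.mul_comm, Nat.testBit_two_pow_mul_add a h]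
  rcases Nat.lt_or_ge k n with hk | hk
  · simp [hk, Nat.not_le_of_lt hk]
  · simp [hk, Nat.not_lt_of_le hk,
      Nat.testBit_lt_two_pow (Nat.lt_of_lt_of_le h (Nat.pow_le_pow_right (by norm_num) hk))]

theorem intCast_shiftLeft (c : Nat) (n : Nat) : ((c : Int) <<< n) = ((c <<< n : Nat) : Int) := by
  rw [Int.shiftLeft_eq, Nat.shiftLeft_eq]; push_cast; ring

theorem intCast_shiftRight (c : Nat) (n : Nat) : ((c : Int) >>> n) = ((c >>> n : Nat) : Int) := by
  simp [HShiftRight.hShiftRight, Int.shiftRight]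

theorem bor_mul4 (x b : Int) (hx : 0 ≤ x) (hb : 0 ≤ b) (hb4 : b < 4) :
    PySem.Int.bor (x <<< (2:Nat)) b = x * 4 + b := by
  rcases Int.eq_ofNat_of_zero_le hx with ⟨xm, rfl⟩
  rcases Int.eq_ofNat_of_zero_le hb with ⟨bm, rfl⟩
  rw [intCast_shiftLeft, PySem.Int.bor_natCast,
    lor_shiftLeft_eq_add xm bm 2 (by exact_mod_cast hb4)]
  push_cast; ring

theorem bor_low_high (a c : Int) (n : Nat) (ha : 0 ≤ a) (han : a < 2^n) (hc : 0 ≤ c) :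
    PySem.Int.bor a (c <<< n) = a + c * 2^n := by
  rcases Int.eq_ofNat_of_zero_le ha with ⟨am, rfl⟩
  rcases Int.eq_ofNat_of_zero_le hc with ⟨cm, rfl⟩
  rw [intCast_shiftLeft, PySem.Int.bor_natCast, Nat.lor_comm,
    lor_shiftLeft_eq_add cm am n (by exact_mod_cast han)]
  push_cast; ring

theorem band_mask (x : Int) (n : Nat) (hx : 0 ≤ x) :
    PySem.Int.band x (2^n - 1) = x % 2^n := by
  rcases Int.eq_ofNat_of_zero_le hx with ⟨xm, rfl⟩
  have h1 : ((2:Int)^n - 1) = ((2^n - 1 : Nat) : Int) := by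
    have : 1 ≤ 2^n := Nat.one_le_two_pow
    push_cast [this]; ring
  rw [h1, PySem.Int.band_natCast, Nat.and_two_pow_sub_one_eq_mod]
  push_cast
  rfl

theorem shiftRight_div (x : Int) (n : Nat) (hx : 0 ≤ x) : x >>> n = x / 2^n := by
  rcases Int.eq_ofNat_of_zero_le hx with ⟨xm, rfl⟩
  rw [intCast_shiftRight, Nat.shiftRight_eq_div_pow]
  rw [show ((2:Int)^n) = ((2^n : Nat) : Int) by push_cast; ring]
  exact (Int.natCast_ediv xm (2^n)).symm

-- ---- window encodings and validity ----

def encF (cs : List Char) (p : Int) : Nat → Int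
  | 0 => 0
  | m + 1 => encF cs p m * 4 + bOf cs (p + m)

def encR (cs : List Char) (p : Int) : Nat → Int
  | 0 => 0
  | m + 1 => encR cs p m + (3 - bOf cs (p + (m : Int))) * 4 ^ m

def okB (cs : List Char) (p : Int) (m : Nat) : Bool :=
  (List.range m).all (fun t => !(bOf cs (p + (t : Int)) == 4))

def contrib (cs : List Char) (K : Nat) (both : Bool) (p : Int) : List Int :=
  if okB cs p K then [encF cs p K] ++ (if both then [encR cs p K] else []) else []

def specR (cs : List Char) (K : Nat) (both : Bool) (a b : Int) : List Int :=
  (PySem.List.pyRange a b).flatMap (contrib cs K both)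

-- A's loop invariant: positions i..i+j-1 are a valid window, x's low bits encode it forward,
-- xb's high bits encode its reverse complement (low bits are stale junk u)
def InvA (cs : List Char) (K : Nat) (i j x xb : Int) : Prop :=
  0 ≤ i ∧ 0 ≤ j ∧ j ≤ (K : Int) ∧ i + j ≤ (cs.length : Int) ∧
  okB cs i j.toNat = true ∧
  0 ≤ x ∧ x % 4 ^ j.toNat = encF cs i j.toNat ∧
  ∃ u : Int, 0 ≤ u ∧ u < 4 ^ (K - j.toNat) ∧ xb = u + encR cs i j.toNat * 4 ^ (K - j.toNat)

theorem nuc_items : nuc.items =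
    [('A',0),('a',0),('C',1),('c',1),('G',2),('g',2),('T',3),('t',3),('U',3),('u',3)] := by rfl

theorem getD_nuc_bounds (c : Char) : 0 ≤ PySem.Dict.getD nuc c 4 ∧ PySem.Dict.getD nuc c 4 ≤ 4 := by
  simp only [PySem.Dict.getD, PySem.Dict.get?, nuc_items]
  cases h : List.find? (fun p => p.1 == c)
      [('A',(0:Int)),('a',0),('C',1),('c',1),('G',2),('g',2),('T',3),('t',3),('U',3),('u',3)] with
  | none => simp
  | some p =>
    have hm := List.mem_of_find?_eq_some h
    fin_cases hm <;> simp

theorem bOf_bounds (cs : List Char) (p : Int) : 0 ≤ bOf cs p ∧ bOf cs p ≤ 4 := by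
  unfold bOf
  cases PySem.List.pyGet? cs p with
  | none => norm_num
  | some c => exact getD_nuc_bounds c

theorem okB_iff (cs : List Char) (p : Int) (m : Nat) :
    okB cs p m = true ↔ ∀ t : Nat, t < m → bOf cs (p + (t:Int)) ≠ 4 := by
  simp [okB, List.all_eq_true, List.mem_range]

theorem okB_zero (cs : List Char) (p : Int) : okB cs p 0 = true := rfl

theorem okB_succ (cs : List Char) (p : Int) (m : Nat) :
    okB cs p (m+1) = (okB cs p m && !(bOf cs (p + (m:Int)) == 4)) := by
  simp [okB, List.range_succ]

theorem okB_cons (cs : List Char) (p : Int) (m : Nat) :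
    okB cs p (m+1) = (!(bOf cs p == 4) && okB cs (p+1) m) := by
  apply Bool.eq_iff_iff.mpr
  simp only [okB_iff, Bool.and_eq_true, Bool.not_eq_true', beq_eq_false_iff_ne]
  constructor
  · intro h
    refine ⟨by simpa using h 0 (Nat.succ_pos m), fun t ht => ?_⟩
    have h2 := h (t+1) (by omega)
    have harg : p + ((t+1 : Nat) : Int) = (p+1) + (t : Nat) := by push_cast; ring
    rwa [harg] at h2
  · rintro ⟨h0, h⟩ t ht
    cases t with
    | zero => simpa using h0
    | succ t =>
      have h2 := h t (by omega)
      have harg : p + ((t+1 : Nat) : Int) = (p+1) + (t : Nat) := by push_cast; ring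
      rwa [harg]

theorem encF_cons (cs : List Char) (p : Int) (m : Nat) :
    encF cs p (m+1) = bOf cs p * 4^m + encF cs (p+1) m := by
  induction m with
  | zero => simp [encF]
  | succ m ih =>
    have : encF cs p (m+1+1) = encF cs p (m+1) * 4 + bOf cs (p + (m+1 : Nat)) := rfl
    rw [this, ih]
    have : encF cs (p+1) (m+1) = encF cs (p+1) m * 4 + bOf cs ((p+1) + (m : Nat)) := rfl
    rw [this]
    have harg : p + ((m+1 : Nat) : Int) = (p+1) + (m : Nat) := by push_cast; ring
    rw [harg]; ring

theorem encR_cons (cs : List Char) (p : Int) (m : Nat) :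
    encR cs p (m+1) = (3 - bOf cs p) + 4 * encR cs (p+1) m := by
  induction m with
  | zero => simp [encR]
  | succ m ih =>
    have h1 : encR cs p (m+1+1) = encR cs p (m+1) + (3 - bOf cs (p + ((m+1 : Nat) : Int))) * 4^(m+1) := rfl
    have h2 : encR cs (p+1) (m+1) = encR cs (p+1) m + (3 - bOf cs ((p+1) + (m : Nat))) * 4^m := rfl
    have harg : p + ((m+1 : Nat) : Int) = (p+1) + (m : Nat) := by push_cast; ring
    rw [h1, ih, h2, harg]; ring

theorem encF_bounds (cs : List Char) (p : Int) (m : Nat) (h : okB cs p m = true) :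
    0 ≤ encF cs p m ∧ encF cs p m < 4^m := by
  induction m with
  | zero => simp [encF]
  | succ m ih =>
    rw [okB_succ] at h
    rcases Bool.and_eq_true_iff.mp h with ⟨h1, h2⟩
    have hd := bOf_bounds cs (p + (m:Int))
    have hd4 : bOf cs (p + (m:Int)) ≠ 4 := by simpa using h2
    have := ih h1
    have hstep : encF cs p (m+1) = encF cs p m * 4 + bOf cs (p + (m:Int)) := rfl
    constructor
    · rw [hstep]; nlinarith [this.1, hd.1]
    · rw [hstep, pow_succ]
      nlinarith [this.2, hd.1, hd.2, lt_of_le_of_ne hd.2 hd4]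

theorem encR_bounds (cs : List Char) (p : Int) (m : Nat) (h : okB cs p m = true) :
    0 ≤ encR cs p m ∧ encR cs p m < 4^m := by
  induction m with
  | zero => simp [encR]
  | succ m ih =>
    rw [okB_succ] at h
    rcases Bool.and_eq_true_iff.mp h with ⟨h1, h2⟩
    have hd := bOf_bounds cs (p + (m:Int))
    have hd4 : bOf cs (p + (m:Int)) ≠ 4 := by simpa using h2
    have := ih h1
    have hstep : encR cs p (m+1) = encR cs p m + (3 - bOf cs (p + (m:Int))) * 4^m := rfl
    have h4m : (0:Int) < 4^m := by positivity
    constructor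
    · rw [hstep]; nlinarith [this.1, hd.1, lt_of_le_of_ne hd.2 hd4]
    · rw [hstep, pow_succ]; nlinarith [this.2, hd.1]

-- one invalid character inside the window invalidates it
theorem okB_false_of (cs : List Char) (p : Int) (m : Nat) (t : Nat) (ht : t < m)
    (hb : bOf cs (p + (t:Int)) = 4) : okB cs p m = false := by
  cases h : okB cs p m with
  | false => rfl
  | true => exact absurd hb ((okB_iff cs p m).mp h t ht)

-- post-condition of A's inner loop: the invariant again, i moved forward only over invalid windows,
-- and the loop stopped with a full window or at the end of the sequence
def PostI (cs : List Char) (K : Nat) (i0 : Int) (r : Int × Int × Int × Int) : Prop :=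
  InvA cs K r.1 r.2.1 r.2.2.1 r.2.2.2 ∧ i0 ≤ r.1 ∧
  (r.2.1 = (K : Int) ∨ r.1 + r.2.1 = (cs.length : Int)) ∧
  (∀ p : Int, i0 ≤ p → p < r.1 → okB cs p K = false)

set_option maxHeartbeats 1000000 in
theorem innerA_eq (cs : List Char) (K : Nat) (i j x xb : Int) :
    InvA cs K i j x xb →
    PostI cs K i (innerA cs (cs.length : Int) (K : Int) (2*(K-1)) i j x xb) := by
  fun_induction innerA cs (cs.length : Int) (K : Int) (2*(K-1)) i j x xb with
  | case1 i j x xb hg b hb ih =>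
    intro hInv
    have hb4 : bOf cs (i + j) = 4 := by
      have h := hb; simp only [beq_iff_eq] at h; exact h
    obtain ⟨hi, hj, hjK, hiz, hok, hx, hxF, u, hu0, hult, hxb⟩ := hInv
    have hInv' : InvA cs K (i+j+1) 0 0 0 := by
      refine ⟨by omega, le_refl 0, by positivity, by omega, okB_zero cs _, le_refl 0, ?_, 0,
        le_refl 0, by positivity, ?_⟩
      · simp [encF]
      · simp [encR]
    have hpost := ih hInv'
    refine ⟨hpost.1, by have := hpost.2.1; omega, hpost.2.2.1, ?_⟩
    intro p hp1 hp2
    by_cases hpi : p < i + j + 1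
    · apply okB_false_of cs p K (i+j-p).toNat (by omega)
      rw [show p + (((i+j-p).toNat : Nat) : Int) = i + j by omega]
      exact hb4
    · exact hpost.2.2.2 p (by omega) hp2
  | case2 i j x xb hg b hb ih =>
    intro hInv
    obtain ⟨hi, hj, hjK, hiz, hok, hx, hxF, u, hu0, hult, hxb⟩ := hInv
    obtain ⟨m, hm⟩ : ∃ m : Nat, j = (m : Int) := ⟨j.toNat, by omega⟩
    subst hm
    simp only [Int.toNat_natCast] at hok hxF hult hxb
    have hbb : 0 ≤ b ∧ b ≤ 4 := bOf_bounds cs (i + (m : Int))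
    have hb4 : b ≠ 4 := by
      have h := hb; simp only [beq_iff_eq] at h; exact h
    have hbdef : bOf cs (i + (m : Int)) = b := rfl
    have hmK : m < K := by omega
    have hb3 : b ≤ 3 := by have := lt_of_le_of_ne hbb.2 hb4; omega
    -- the two bit-fiddling steps, arithmetically
    have hxeq : PySem.Int.bor (x <<< (2:Nat)) b = x * 4 + b :=
      bor_mul4 x b hx hbb.1 (by omega)
    have h2pow : (2:Int)^(2*(K-1)) = 4^(K-1) := by rw [pow_mul]; norm_num
    have hek := encR_bounds cs i m hok
    have hp4 : (0:Int) < 4^(K-m) := by positivity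
    have hxb0 : 0 ≤ xb := by nlinarith [hek.1]
    have hxbK : xb < 4^K := by
      have h4split : (4:Int)^m * 4^(K-m) = 4^K := by rw [← pow_add]; congr 1; omega
      nlinarith [hek.2]
    have hshr : xb >>> (2:Nat) = xb / 4 := by
      rw [shiftRight_div xb 2 hxb0]; norm_num
    have hdivlt : xb / 4 < 4^(K-1) := by
      rw [Int.ediv_lt_iff_lt_mul (by norm_num)]
      calc xb < 4^K := hxbK
        _ = 4^(K-1) * 4 := by rw [← pow_succ]; congr 1; omega
    have hxbeq : PySem.Int.bor (xb >>> (2:Nat)) ((3 - b) <<< (2*(K-1)))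
        = xb / 4 + (3 - b) * 4^(K-1) := by
      rw [hshr, bor_low_high (xb / 4) (3 - b) (2*(K-1))
        (Int.ediv_nonneg hxb0 (by norm_num)) (by rw [h2pow]; exact hdivlt) (by omega), h2pow]
    rw [hxeq, hxbeq] at ih ⊢
    -- the new state satisfies the invariant
    have hjt : ((m : Int)+1).toNat = m + 1 := by omega
    have hxbdiv : xb / 4 = u / 4 + encR cs i m * 4^(K-m-1) := by
      have hB' : (4:Int)^(K-m) = 4^(K-m-1) * 4 := by rw [← pow_succ]; congr 1; omega
      rw [hxb, hB', show u + encR cs i m * (4^(K-m-1) * 4) = u + (encR cs i m * 4^(K-m-1)) * 4 by ring,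
        Int.add_mul_ediv_right _ _ (by norm_num)]
    have hInv' : InvA cs K i ((m : Int)+1) (x * 4 + b) (xb / 4 + (3 - b) * 4^(K-1)) := by
      refine ⟨hi, by omega, by omega, by omega, ?_, by nlinarith [hbb.1], ?_, ?_⟩
      · rw [hjt, okB_succ, hbdef]
        simp [hok, hb4]
      · -- forward code of the extended window
        rw [hjt]
        have hxmod : 0 ≤ x % 4^m ∧ x % 4^m < 4^m :=
          ⟨Int.emod_nonneg x (by positivity), Int.emod_lt_of_pos x (by positivity)⟩
        have hsplit : x * 4 + b = (x % 4^m * 4 + b) + (x / 4^m) * 4^(m+1) := by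
          have hx4 := Int.mul_ediv_add_emod x (4^m)
          rw [pow_succ]; nlinarith [hx4]
        rw [hsplit, Int.add_mul_emod_self_right, Int.emod_eq_of_lt (by nlinarith [hbb.1, hxmod.1])
          (by rw [pow_succ]; nlinarith [hxmod.2, hb3])]
        rw [hxF]
        show encF cs i m * 4 + b = encF cs i m * 4 + bOf cs (i + (m:Int))
        rw [hbdef]
      · -- reverse-complement code of the extended window
        refine ⟨u / 4, Int.ediv_nonneg hu0 (by norm_num), ?_, ?_⟩
        · rw [hjt]
          rw [Int.ediv_lt_iff_lt_mul (by norm_num)]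
          calc u < 4^(K-m) := hult
            _ = 4^(K-(m+1)) * 4 := by rw [← pow_succ]; congr 1; omega
        · rw [hjt, hxbdiv]
          have hR : encR cs i (m+1) = encR cs i m + (3 - bOf cs (i + (m : Int))) * 4^m := rfl
          have hKm : (4:Int)^m * 4^(K-(m+1)) = 4^(K-1) := by rw [← pow_add]; congr 1; omega
          rw [hR, hbdef, add_mul, mul_assoc, hKm]
          have : (4:Int)^(K-m-1) = 4^(K-(m+1)) := by congr 1
          rw [this]; ring
    exact ih hInv'
  | case3 i j x xb hg =>
    intro hInv
    refine ⟨hInv, le_refl i, ?_, fun p h1 h2 => absurd h2 (by change ¬ p < i; omega)⟩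
    obtain ⟨hi, hj, hjK, hiz, _⟩ := hInv
    change j = (K : Int) ∨ i + j = (cs.length : Int)
    omega

theorem specR_append (cs : List Char) (K : Nat) (both : Bool) (a m b : Int)
    (h1 : a ≤ m) (h2 : m ≤ b) :
    specR cs K both a b = specR cs K both a m ++ specR cs K both m b := by
  unfold specR
  rw [PySem.List.pyRange_one_append a m b h1 h2, List.flatMap_append]

theorem specR_nil_of (cs : List Char) (K : Nat) (both : Bool) (a b : Int)
    (h : ∀ p : Int, a ≤ p → p < b → okB cs p K = false) :
    specR cs K both a b = [] := by
  unfold specR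
  rw [List.flatMap_eq_nil_iff]
  intro p hp
  rw [PySem.List.mem_pyRange_one] at hp
  simp [contrib, h p hp.1 hp.2]

theorem specR_singleton (cs : List Char) (K : Nat) (both : Bool) (a : Int) :
    specR cs K both a (a+1) = contrib cs K both a := by
  unfold specR
  rw [PySem.List.pyRange_one_singleton]
  simp

set_option maxHeartbeats 1000000 in
theorem outerA_eq (cs : List Char) (K : Nat) (both : Bool) (hK : 1 ≤ K) :
    ∀ (fuel : Nat) (i j x xb : Int) (res : List Int),
    InvA cs K i j x xb →
    ((cs.length : Int) - (K : Int) + 1 - i).toNat < fuel →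
    outerA cs (cs.length : Int) (K : Int) (4^K - 1) (2*(K-1)) both fuel i j x xb res
      = res ++ specR cs K both i ((cs.length : Int) - (K : Int) + 1) := by
  intro fuel
  induction fuel with
  | zero => intro i j x xb res _ hfuel; exact absurd hfuel (by omega)
  | succ fuel ih =>
    intro i j x xb res hInv hfuel
    rw [outerA]
    by_cases hguard : i + (K : Int) ≤ (cs.length : Int)
    case neg =>
      rw [if_neg hguard]
      rw [specR_nil_of cs K both _ _ (fun p h1 h2 => absurd (h1.trans_lt h2) (by omega)),
        List.append_nil]
    case pos =>
      rw [if_pos hguard]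
      obtain ⟨hInvR, hiR, hexit, hskip⟩ := innerA_eq cs K i j x xb hInv
      set r := innerA cs (cs.length : Int) (K : Int) (2*(K-1)) i j x xb with hr
      obtain ⟨hi', hj', hjK', hiz', hok', hx', hxF', u, hu0, hult, hxb'⟩ := hInvR
      by_cases hjk : r.2.1 = (K : Int)
      case pos =>
        rw [if_pos (by simpa using hjk)]
        have hKt : r.2.1.toNat = K := by omega
        rw [hKt] at hok' hxF' hult hxb'
        have hokK : okB cs r.1 K = true := hok'
        have hBnd : i ≤ r.1 ∧ r.1 ≤ (cs.length : Int) - (K : Int) := by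
          constructor
          · exact hiR
          · omega
        -- the appended values are the window's two encodings
        have h42 : (4:Int)^K = 2^(2*K) := by rw [pow_mul]; norm_num
        have hx2 : PySem.Int.band r.2.2.1 ((4:Int)^K - 1) = encF cs r.1 K := by
          rw [h42, band_mask r.2.2.1 (2*K) hx', ← h42, hxF']
        have hxbv : r.2.2.2 = encR cs r.1 K := by
          have hu : u = 0 := by
            have : u < 1 := by simpa using hult
            omega
          rw [hxb', hu]
          simp
        -- invariant for the next outer state
        have hcons : okB cs r.1 (K - 1 + 1) = (!(bOf cs r.1 == 4) && okB cs (r.1+1) (K-1)) :=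
          okB_cons cs r.1 (K-1)
        rw [show K - 1 + 1 = K from by omega] at hcons
        have hand : (!(bOf cs r.1 == 4) && okB cs (r.1+1) (K-1)) = true := hcons.symm.trans hokK
        have hok1 : okB cs (r.1+1) (K-1) = true := (Bool.and_eq_true_iff.mp hand).2
        have hb0 : bOf cs r.1 ≠ 4 := by
          have h := (Bool.and_eq_true_iff.mp hand).1
          simpa using h
        have hbv := bOf_bounds cs r.1
        have hFcons : encF cs r.1 K = bOf cs r.1 * 4^(K-1) + encF cs (r.1+1) (K-1) := by
          have := encF_cons cs r.1 (K-1)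
          rwa [show K - 1 + 1 = K from by omega] at this
        have hRcons : encR cs r.1 K = (3 - bOf cs r.1) + 4 * encR cs (r.1+1) (K-1) := by
          have := encR_cons cs r.1 (K-1)
          rwa [show K - 1 + 1 = K from by omega] at this
        have hFb := encF_bounds cs (r.1+1) (K-1) hok1
        have hInvNew : InvA cs K (r.1+1) ((K:Int)-1) (encF cs r.1 K) (encR cs r.1 K) := by
          refine ⟨by omega, by omega, by omega, by omega, ?_, (encF_bounds cs r.1 K hokK).1,
            ?_, 3 - bOf cs r.1, by omega, ?_, ?_⟩ <;>
            rw [show ((K:Int)-1).toNat = K - 1 from by omega]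
          · exact hok1
          · rw [hFcons, add_comm, Int.add_mul_emod_self_right,
              Int.emod_eq_of_lt hFb.1 hFb.2]
          · rw [show K - (K - 1) = 1 from by omega]
            omega
          · rw [show K - (K - 1) = 1 from by omega, hRcons]
            ring
        have hfuel' : ((cs.length : Int) - (K : Int) + 1 - (r.1+1)).toNat < fuel := by omega
        rw [hjk, hx2, hxbv]
        rw [ih (r.1+1) ((K:Int)-1) (encF cs r.1 K) (encR cs r.1 K) _ hInvNew hfuel']
        -- reassemble the spec list
        rw [specR_append cs K both i r.1 _ hBnd.1 (by omega),
          specR_nil_of cs K both i r.1 hskip,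
          specR_append cs K both r.1 (r.1+1) _ (by omega) (by omega),
          specR_singleton]
        rw [show contrib cs K both r.1
            = [encF cs r.1 K] ++ (if both then [encR cs r.1 K] else []) from by
          simp [contrib, hokK]]
        simp [List.append_assoc]
      case neg =>
        rw [if_neg (by simpa using hjk)]
        have hz : r.1 + r.2.1 = (cs.length : Int) := by
          rcases hexit with h | h
          · exact absurd h hjk
          · exact h
        have hnil : specR cs K both i ((cs.length : Int) - (K : Int) + 1) = [] := by
          apply specR_nil_of
          intro p h1 h2
          exact hskip p h1 (by omega)
        rw [hnil, List.append_nil]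
        cases fuel with
        | zero => rfl
        | succ f =>
          rw [outerA, if_neg (by omega)]

theorem bOf_getElem (cs : List Char) (p : Nat) (h : p < cs.length) :
    bOf cs (p : Int) = PySem.Dict.getD nuc cs[p] 4 := by
  unfold bOf
  rw [PySem.List.pyGet?_natCast, List.getElem?_eq_getElem h]

theorem encWin_eq (cs : List Char) (m : Nat) : ∀ (p t : Nat) (x xb : Int), p + m ≤ cs.length →
    encWin t x xb ((cs.drop p).take m) =
      (if okB cs (p : Int) m then some (x * 4^m + encF cs (p : Int) m, xb + encR cs (p : Int) m * 4^t)
       else none) := by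
  induction m with
  | zero =>
    intro p t x xb _
    simp [encWin, okB_zero, encF, encR]
  | succ m ih =>
    intro p t x xb hpm
    have hp : p < cs.length := by omega
    rw [List.drop_eq_getElem_cons hp, List.take_succ_cons]
    rw [show (encWin t x xb (cs[p] :: ((cs.drop (p+1)).take m))) =
      (if (PySem.Dict.getD nuc cs[p] 4) == 4 then none
       else encWin (t+1) (x * 4 + PySem.Dict.getD nuc cs[p] 4)
         (xb + (3 - PySem.Dict.getD nuc cs[p] 4) * 4^t) ((cs.drop (p+1)).take m)) from rfl]
    rw [← bOf_getElem cs p hp, okB_cons]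
    cases hb : bOf cs (p : Int) == 4 with
    | true => simp
    | false =>
      have hb' : bOf cs (p : Int) ≠ 4 := by simpa using hb
      rw [ih (p+1) (t+1) (x * 4 + bOf cs (p : Int)) (xb + (3 - bOf cs (p : Int)) * 4^t) (by omega)]
      have hc : (((p+1 : Nat)) : Int) = (p : Int) + 1 := by push_cast; ring
      rw [hc]
      simp only [Bool.not_false, Bool.true_and]
      cases hok : okB cs ((p : Int) + 1) m with
      | false => simp
      | true =>
        simp only [Bool.false_eq_true, if_false, if_true, Option.some.injEq, Prod.mk.injEq]
        refine ⟨?_, ?_⟩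
        · rw [encF_cons]; ring
        · rw [encR_cons]; ring

theorem foldl_winAcc (cs : List Char) (kk : Int) (both : Bool) :
    ∀ (l : List Int) (res : List Int),
    l.foldl (fun res i =>
      match encWin 0 0 0 (PySem.List.slice cs (some i) (some (i + kk))) with
      | some (x, xb) => (res ++ [x]) ++ (if both then [xb] else [])
      | none => res) res
    = res ++ l.flatMap (fun i =>
      match encWin 0 0 0 (PySem.List.slice cs (some i) (some (i + kk))) with
      | some (x, xb) => [x] ++ (if both then [xb] else [])
      | none => []) := by
  intro l
  induction l with
  | nil => intro res; simp
  | cons i l ih =>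
    intro res
    rw [List.foldl_cons, ih, List.flatMap_cons]
    cases h : encWin 0 0 0 (PySem.List.slice cs (some i) (some (i + kk))) with
    | none => simp
    | some v => cases v with | mk a b => simp [List.append_assoc]

theorem alt_eq_specR (k : Int) (seq : String) (both : Bool) (K : Nat) (hk : k = (K : Int)) :
    kmersList_alt k seq both
      = specR seq.toList K both 0 ((seq.toList.length : Int) - (K : Int) + 1) := by
  subst hk
  unfold kmersList_alt specR
  rw [PySem.Str.len_eq, foldl_winAcc]
  rw [List.nil_append]
  apply List.flatMap_congr
  intro i hi
  rw [PySem.List.mem_pyRange_one] at hi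
  obtain ⟨p, rfl⟩ : ∃ p : Nat, i = (p : Int) := ⟨i.toNat, by omega⟩
  have hpm : p + K ≤ seq.toList.length := by omega
  rw [PySem.List.slice_natCast_add, encWin_eq seq.toList K p 0 0 0 hpm]
  unfold contrib
  cases hok : okB seq.toList (p : Int) K with
  | false => rfl
  | true => simp

-- ===== VERDICT (by name: the statement is the Claim_ definition above) =====
theorem kmersList_spec : Claim_equal_kmersList := by
  intro k seq both _ hpre
  unfold Pre_kmersList at hpre
  unfold Spec_kmersList
  obtain ⟨K, hk⟩ : ∃ K : Nat, k = (K : Int) := ⟨k.toNat, by omega⟩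
  have hK : 1 ≤ K := by omega
  rw [alt_eq_specR k seq both K hk]
  subst hk
  unfold kmersList
  rw [PySem.Str.len_eq]
  have hmsk : ((1:Int) <<< (2*(K:Int)).toNat) - 1 = 4^K - 1 := by
    rw [show (2*(K:Int)).toNat = 2*K from by omega, Int.shiftLeft_eq, one_mul, pow_mul]
    norm_num
  have hs : (2*((K:Int)-1)).toNat = 2*(K-1) := by omega
  rw [hmsk, hs]
  have hInv0 : InvA seq.toList K 0 0 0 0 := by
    refine ⟨le_refl 0, le_refl 0, by omega, by omega, ?_, le_refl 0, ?_, 0, le_refl 0,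
      by positivity, ?_⟩
    · exact okB_zero _ _
    · simp [encF]
    · simp [encR]
  rw [outerA_eq seq.toList K both hK _ 0 0 0 0 [] hInv0 (by omega)]
  simp
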